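-- pv_equiv track=rewrite | github.com/Saketh-Reddy-Bejadi/Python | programs/ArrayCollapse.py | solve
-- ===== SOURCE A (Python) =====
-- MOD = 998244353
--
-- def solve(arr):
--     n = len(arr)
--
--     dp = [[0] * (n+1) for _ in range(n+1)]
--     dp[0][0] = 1
--
--     for i in range(1, n+1):
--         for j in range(i+1):
--             if j > 0:
--                 dp[i][j] += dp[i-1][j-1]
--             if j < i:
--                 dp[i][j] += dp[i-1][j]
--             dp[i][j] %= MOD
--
--     ans = sum(dp[n]) % MOD
--     return ans
-- ===== SOURCE B (Python) =====
-- MOD = 998244353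
--
-- def solve(arr):
--     return pow(2, len(arr), MOD)
-- ===== Notes on version B (the rewrite author's own statement) =====
-- stated objective: faster
-- what changed: A builds the full Pascal-triangle DP table and sums the last row; B recognizes that the row sum of binomial coefficients is 2^n and returns pow(2, len(arr), MOD) by fast modular exponentiation.
import Mathlib
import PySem

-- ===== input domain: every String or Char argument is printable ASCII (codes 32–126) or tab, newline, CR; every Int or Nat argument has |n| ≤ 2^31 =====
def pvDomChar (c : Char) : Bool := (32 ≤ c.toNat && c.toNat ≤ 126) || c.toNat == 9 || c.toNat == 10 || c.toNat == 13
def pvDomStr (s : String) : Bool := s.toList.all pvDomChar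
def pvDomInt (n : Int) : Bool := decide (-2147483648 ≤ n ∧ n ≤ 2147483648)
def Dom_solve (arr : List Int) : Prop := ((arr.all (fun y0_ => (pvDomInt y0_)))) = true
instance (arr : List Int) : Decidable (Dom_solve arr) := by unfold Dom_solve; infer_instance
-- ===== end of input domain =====

-- B replaces A's O(n^2) Pascal-triangle DP (whose last-row sum is ∑ C(n,j) = 2^n) by modular exponentiation pow(2, n, MOD).

-- ===== PORT A =====
def pvMOD : Int := 998244353

-- A-side helper: the body of A's inner loop — reads dp[i][j], dp[i-1][j-1], dp[i-1][j], writes dp[i][j] %= MOD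
def pvRowStep (prev : List Int) (i : Nat) (row : List Int) (j : Nat) : List Int :=
  row.set j ((if j < i then (if 0 < j then row.getD j 0 + prev.getD (j-1) 0 else row.getD j 0) + prev.getD j 0
              else (if 0 < j then row.getD j 0 + prev.getD (j-1) 0 else row.getD j 0)) % pvMOD)

def solve (arr : List Int) : Int :=
  let n := arr.length
  let dp : List (List Int) := (List.range (n+1)).map (fun _ => List.replicate (n+1) (0:Int))
  let dp := dp.set 0 ((dp.getD 0 []).set 0 1)
  let dp := (List.range' 1 n).foldl (fun dp i =>
      (List.range (i+1)).foldl (fun dp j =>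
        dp.set i (pvRowStep (dp.getD (i-1) []) i (dp.getD i []) j)) dp) dp
  (dp.getD n []).sum % pvMOD

-- ===== PORT B =====
def solve_alt (arr : List Int) : Int := (2 : Int) ^ arr.length % pvMOD

-- ===== PRECONDITION & SPEC =====
def Spec_solve (arr : List Int) (out : Int) : Prop := out = solve_alt arr
instance (arr : List Int) (out : Int) : Decidable (Spec_solve arr out) := by unfold Spec_solve; infer_instance

-- ===== CLAIM (what is proved, stated in full; the proofs are below) =====
def Claim_equal_solve : Prop := ∀ (arr : List Int), Dom_solve arr → Spec_solve arr (solve arr)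

-- ===== LEMMAS AND PROOFS =====

-- row i of the finished table: C(i,j) % MOD for j ≤ i, untouched zeros beyond
def pvRowC (n i : Nat) : List Int :=
  (List.range (n+1)).map (fun j => if j ≤ i then ((Nat.choose i j : Int) % pvMOD) else 0)

-- the row after the first k iterations of A's inner loop on row i
def pvPartial (n i k : Nat) : List Int :=
  (List.range (n+1)).map (fun j => if j < k ∧ j ≤ i then ((Nat.choose i j : Int) % pvMOD) else 0)

theorem pv_getD_set_self {α : Type} {l : List α} {i : Nat} (h : i < l.length) (a d : α) :
    (l.set i a).getD i d = a := by
  simp [List.getD_eq_getElem?_getD, h]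

theorem pv_getD_set_ne {α : Type} {l : List α} {i j : Nat} (h : i ≠ j) (a : α) (d : α) :
    (l.set i a).getD j d = l.getD j d := by
  simp [List.getD_eq_getElem?_getD, List.getElem?_set_ne h]

theorem pv_set_getD_self {α : Type} {l : List α} {i : Nat} (h : i < l.length) (d : α) :
    l.set i (l.getD i d) = l := by
  simp [List.getD_eq_getElem?_getD, List.getElem?_eq_getElem h]

theorem pv_getD_rowC (n i j : Nat) (hj : j ≤ n) :
    (pvRowC n i).getD j 0 = if j ≤ i then ((Nat.choose i j : Int) % pvMOD) else 0 := by
  have hlt : j < n + 1 := by omega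
  simp [pvRowC, List.getD_eq_getElem?_getD, List.getElem?_map, List.getElem?_range hlt]

theorem pv_getD_partial (n i k j : Nat) (hj : j ≤ n) :
    (pvPartial n i k).getD j 0 = if j < k ∧ j ≤ i then ((Nat.choose i j : Int) % pvMOD) else 0 := by
  have hlt : j < n + 1 := by omega
  simp [pvPartial, List.getD_eq_getElem?_getD, List.getElem?_map, List.getElem?_range hlt]

-- the inner fold only ever rewrites row i, reading the frozen row i-1
theorem pv_inner_factor (L : List Nat) (i : Nat) (hi : 1 ≤ i) :
    ∀ dp : List (List Int), i < dp.length →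
    L.foldl (fun dp j => dp.set i (pvRowStep (dp.getD (i-1) []) i (dp.getD i []) j)) dp
      = dp.set i (L.foldl (fun row j => pvRowStep (dp.getD (i-1) []) i row j) (dp.getD i [])) := by
  induction L with
  | nil =>
      intro dp h
      simp only [List.foldl_nil]
      exact (pv_set_getD_self h []).symm
  | cons j L ih =>
      intro dp h
      simp only [List.foldl_cons]
      rw [ih _ (by simpa using h)]
      rw [pv_getD_set_ne (by omega), pv_getD_set_self h, List.set_set]

theorem pv_partial_zero (n i : Nat) : pvPartial n i 0 = List.replicate (n+1) 0 := by
  simp [pvPartial]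

theorem pv_partial_set (n i k : Nat) (hk : k ≤ n) (hki : k ≤ i) :
    (pvPartial n i k).set k ((Nat.choose i k : Int) % pvMOD) = pvPartial n i (k+1) := by
  apply List.ext_getElem
  · simp [pvPartial]
  · intro m h1 h2
    simp only [pvPartial, List.length_map, List.length_range] at h2
    rw [List.getElem_set]
    simp only [pvPartial, List.getElem_map, List.getElem_range]
    split_ifs <;> first | rfl | omega | (subst_vars; rfl)

theorem pv_emod_emod (a : Int) : a % pvMOD % pvMOD = a % pvMOD :=
  Int.emod_emod_of_dvd a dvd_rfl

theorem pv_row_fold (n i : Nat) (hi : 1 ≤ i) (hin : i ≤ n) :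
    (List.range (i+1)).foldl (fun row j => pvRowStep (pvRowC n (i-1)) i row j)
        (List.replicate (n+1) 0) = pvRowC n i := by
  have aux : ∀ k, k ≤ i+1 →
      (List.range k).foldl (fun row j => pvRowStep (pvRowC n (i-1)) i row j)
        (List.replicate (n+1) 0) = pvPartial n i k := by
    intro k
    induction k with
    | zero => intro _; simp [pv_partial_zero]
    | succ k ihk =>
        intro hk1
        have hk : k ≤ i := by omega
        rw [List.range_succ, List.foldl_append, ihk (by omega), List.foldl_cons, List.foldl_nil]
        show pvRowStep (pvRowC n (i-1)) i (pvPartial n i k) k = pvPartial n i (k+1)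
        have hcur : (pvPartial n i k).getD k 0 = 0 := by
          rw [pv_getD_partial n i k k (by omega)]; simp
        unfold pvRowStep
        rw [hcur]
        have key : (if k < i then (if 0 < k then (0:Int) + (pvRowC n (i-1)).getD (k-1) 0 else 0) + (pvRowC n (i-1)).getD k 0
              else (if 0 < k then (0:Int) + (pvRowC n (i-1)).getD (k-1) 0 else 0)) % pvMOD
            = (Nat.choose i k : Int) % pvMOD := by
          rcases Nat.eq_zero_or_pos k with hk0 | hkpos
          · subst hk0
            rw [if_pos (by omega : 0 < i), if_neg (by omega)]
            rw [pv_getD_rowC n (i-1) 0 (by omega), if_pos (by omega)]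
            simp only [Nat.choose_zero_right, Nat.cast_one, zero_add]
            exact pv_emod_emod 1
          · rcases Nat.lt_or_ge k i with hki | hki
            · rw [if_pos hki, if_pos hkpos]
              rw [pv_getD_rowC n (i-1) (k-1) (by omega), if_pos (by omega)]
              rw [pv_getD_rowC n (i-1) k (by omega), if_pos (by omega)]
              have pascal : (Nat.choose i k : Int) = Nat.choose (i-1) (k-1) + Nat.choose (i-1) k := by
                obtain ⟨i', rfl⟩ : ∃ i', i = i' + 1 := ⟨i - 1, by omega⟩
                obtain ⟨k', rfl⟩ : ∃ k', k = k' + 1 := ⟨k - 1, by omega⟩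
                simp only [Nat.add_sub_cancel]
                rw [Nat.choose_succ_succ]
                push_cast; ring
              rw [zero_add, ← Int.add_emod, ← pascal]
            · have hik : k = i := by omega
              subst hik
              rw [if_neg (by omega), if_pos hkpos]
              rw [pv_getD_rowC n (k-1) (k-1) (by omega), if_pos (by omega)]
              rw [Nat.choose_self, Nat.choose_self]
              simp only [Nat.cast_one, zero_add]
              exact pv_emod_emod 1
        rw [key, pv_partial_set n i k (by omega) hk]
  have h1 := aux (i+1) (le_refl _)
  rw [h1]
  unfold pvPartial pvRowC
  apply List.map_congr_left
  intro j _
  by_cases hj : j ≤ i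
  · rw [if_pos ⟨by omega, hj⟩, if_pos hj]
  · rw [if_neg (by omega), if_neg hj]

theorem pv_listsum_finset (m : Nat) (f : Nat → Int) :
    ((List.range m).map f).sum = ∑ j ∈ Finset.range m, f j := by
  induction m with
  | zero => simp
  | succ m ih => rw [List.range_succ, List.map_append, List.sum_append, Finset.sum_range_succ, ih]; simp

theorem pv_sum_rowC (n : Nat) : (pvRowC n n).sum % pvMOD = (2:Int) ^ n % pvMOD := by
  have h1 : pvRowC n n = (List.range (n+1)).map (fun j => (Nat.choose n j : Int) % pvMOD) := by
    unfold pvRowC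
    apply List.map_congr_left
    intro j hj
    rw [if_pos (by simpa using Nat.lt_succ_iff.mp (List.mem_range.mp hj))]
  rw [h1, pv_listsum_finset]
  have h2 : (∑ j ∈ Finset.range (n+1), (Nat.choose n j : Int)) = (2:Int) ^ n := by
    have := Nat.sum_range_choose n
    have hcast : ((∑ j ∈ Finset.range (n+1), Nat.choose n j : Nat) : Int) = ((2^n : Nat) : Int) := by
      exact_mod_cast congrArg (Nat.cast : Nat → Int) this
    push_cast at hcast
    convert hcast using 2
  rw [← Finset.sum_int_mod, h2]

-- the outer loop invariant: after rows 1..k are processed, row j holds pvRowC n j for j ≤ k and is untouched beyond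
theorem pv_outer (n : Nat) (dp1 : List (List Int)) (hlen : dp1.length = n+1)
    (h0 : dp1.getD 0 [] = pvRowC n 0)
    (hz : ∀ j, 0 < j → j ≤ n → dp1.getD j [] = List.replicate (n+1) 0) :
    ∀ k, k ≤ n →
      (((List.range' 1 k).foldl (fun dp i =>
          (List.range (i+1)).foldl (fun dp j =>
            dp.set i (pvRowStep (dp.getD (i-1) []) i (dp.getD i []) j)) dp) dp1).length = n+1
        ∧ (∀ j, j ≤ k → ((List.range' 1 k).foldl (fun dp i =>
            (List.range (i+1)).foldl (fun dp j =>
              dp.set i (pvRowStep (dp.getD (i-1) []) i (dp.getD i []) j)) dp) dp1).getD j [] = pvRowC n j)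
        ∧ (∀ j, k < j → j ≤ n → ((List.range' 1 k).foldl (fun dp i =>
            (List.range (i+1)).foldl (fun dp j =>
              dp.set i (pvRowStep (dp.getD (i-1) []) i (dp.getD i []) j)) dp) dp1).getD j [] = List.replicate (n+1) 0)) := by
  intro k
  induction k with
  | zero =>
      intro _
      refine ⟨hlen, ?_, ?_⟩
      · intro j hj; interval_cases j; simpa using h0
      · intro j hj hjn; exact hz j hj hjn
  | succ k ihk =>
      intro hk1
      obtain ⟨ihlen, ihrow, ihzero⟩ := ihk (by omega)
      rw [List.range'_concat, List.foldl_append, List.foldl_cons, List.foldl_nil]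
      set T := (List.range' 1 k).foldl (fun dp i =>
          (List.range (i+1)).foldl (fun dp j =>
            dp.set i (pvRowStep (dp.getD (i-1) []) i (dp.getD i []) j)) dp) dp1 with hT
      have h1k : (1:Nat) + 1 * k = k + 1 := by omega
      rw [h1k]
      have hklen : k + 1 < T.length := by omega
      rw [pv_inner_factor _ (k+1) (by omega) T hklen]
      have hprev : T.getD (k+1-1) [] = pvRowC n k := by
        simpa using ihrow k (le_refl k)
      have hcur : T.getD (k+1) [] = List.replicate (n+1) 0 := ihzero (k+1) (by omega) (by omega)
      have hfold := pv_row_fold n (k+1) (by omega) (by omega)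
      simp only [Nat.add_sub_cancel] at hfold
      rw [hprev, hcur, hfold]
      refine ⟨by simp only [List.length_set]; exact ihlen, ?_, ?_⟩
      · intro j hj
        rcases Nat.lt_or_ge j (k+1) with h | h
        · rw [pv_getD_set_ne (by omega)]; exact ihrow j (by omega)
        · have : j = k+1 := by omega
          subst this
          exact pv_getD_set_self hklen _ _
      · intro j hj hjn
        rw [pv_getD_set_ne (by omega)]
        exact ihzero j (by omega) hjn

theorem solve_spec' : ∀ arr : List Int, solve arr = solve_alt arr := by
  intro arr
  show solve arr = solve_alt arr
  simp only [solve, solve_alt]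
  set n := arr.length with hn
  have hd1len : (((List.range (n+1)).map (fun _ => List.replicate (n+1) (0:Int))).set 0
      ((((List.range (n+1)).map (fun _ => List.replicate (n+1) (0:Int))).getD 0 []).set 0 1)).length = n+1 := by
    simp
  have hmapconst : ∀ j, j ≤ n → ((List.range (n+1)).map (fun _ => List.replicate (n+1) (0:Int))).getD j [] = List.replicate (n+1) 0 := by
    intro j hj
    have : j < n+1 := by omega
    simp [List.getD_eq_getElem?_getD, this]
  have h0 : (((List.range (n+1)).map (fun _ => List.replicate (n+1) (0:Int))).set 0
      ((((List.range (n+1)).map (fun _ => List.replicate (n+1) (0:Int))).getD 0 []).set 0 1)).getD 0 [] = pvRowC n 0 := by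
    rw [pv_getD_set_self (by simp) _ []]
    rw [hmapconst 0 (by omega)]
    apply List.ext_getElem
    · simp [pvRowC]
    · intro m h1 h2
      simp only [pvRowC, List.getElem_map, List.getElem_range]
      rw [List.getElem_set]
      simp only [List.getElem_replicate]
      by_cases hm : m = 0
      · subst hm; simp [pvMOD]
      · rw [if_neg (by omega), if_neg (by omega)]
  have hz : ∀ j, 0 < j → j ≤ n → (((List.range (n+1)).map (fun _ => List.replicate (n+1) (0:Int))).set 0
      ((((List.range (n+1)).map (fun _ => List.replicate (n+1) (0:Int))).getD 0 []).set 0 1)).getD j [] = List.replicate (n+1) 0 := by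
    intro j hj hjn
    rw [pv_getD_set_ne (by omega)]
    exact hmapconst j hjn
  obtain ⟨_, hrow, _⟩ := pv_outer n _ hd1len h0 hz n (le_refl n)
  rw [hrow n (le_refl n), pv_sum_rowC n]

-- ===== VERDICT (by name: the statement is the Claim_ definition above) =====
theorem solve_spec : Claim_equal_solve := by
  intro arr _
  unfold Spec_solve
  exact solve_spec' arr
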